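-- pv_equiv track=rewrite | github.com/zew1me/bike-cal-agent-skill | src/pnw_bike_events/cascade.py | _extract_line_after
-- ===== SOURCE A (Python) =====
-- class CascadeError(RuntimeError):
--     pass
--
-- def _extract_line_after(lines: list[str], header: str) -> str:
--     try:
--         index = lines.index(header)
--     except ValueError as exc:
--         raise CascadeError(f"Could not find section header '{header}'.") from exc
--     for line in lines[index + 1 :]:
--         if line == "(map)":
--             continue
--         return line
--     raise CascadeError(f"No content found after header '{header}'.")
-- ===== SOURCE B (Python) =====
-- class CascadeError(RuntimeError):
--     pass
--
-- def _extract_line_after(lines: list[str], header: str) -> str: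
--     # Index-table approach: build the occurrence table of the header and the
--     # sorted table of positions of non-"(map)" lines, then binary-search the
--     # position table for the first content position past the header.
--     occ = [i for i, line in enumerate(lines) if line == header]
--     if not occ:
--         raise CascadeError(f"Could not find section header '{header}'.")
--     idx = occ[0]
--     nonmap = [i for i, line in enumerate(lines) if line != "(map)"]
--     lo, hi = 0, len(nonmap)
--     while lo < hi:
--         mid = (lo + hi) // 2
--         if nonmap[mid] <= idx:
--             lo = mid + 1
--         else:
--             hi = mid
--     if lo == len(nonmap):
--         raise CascadeError(f"No content found after header '{header}'.")
--     return lines[nonmap[lo]]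
-- ===== Notes on version B (the rewrite author's own statement) =====
-- stated objective: alternative
-- what changed: B builds two index tables with comprehensions (occurrences of the header; positions of non-'(map)' lines) and binary-searches the sorted position table for the first content position past the header, instead of A's .index scan plus slice-and-skip loop.
import Mathlib
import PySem

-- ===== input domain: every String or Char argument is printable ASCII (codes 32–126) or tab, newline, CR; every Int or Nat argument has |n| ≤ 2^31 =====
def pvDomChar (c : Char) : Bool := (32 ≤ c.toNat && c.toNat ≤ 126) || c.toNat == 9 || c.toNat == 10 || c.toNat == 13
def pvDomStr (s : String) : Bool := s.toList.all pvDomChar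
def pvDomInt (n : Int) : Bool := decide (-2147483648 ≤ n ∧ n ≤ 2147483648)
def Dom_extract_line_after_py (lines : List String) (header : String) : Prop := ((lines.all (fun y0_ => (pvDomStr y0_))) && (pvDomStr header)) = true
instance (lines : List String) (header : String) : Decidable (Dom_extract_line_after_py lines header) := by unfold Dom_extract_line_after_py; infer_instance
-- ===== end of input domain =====

-- B replaces A's .index scan + slice-and-skip loop by two comprehension-built index tables and a binary search over the sorted position table (alternative algorithm, same asymptotic cost).


-- ===== PORT A =====
-- the for-loop over lines[index+1:]: skip "(map)", return the first other line; none = falls through to the raise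
def scanAfterA : List String → Option String
  | [] => none
  | l :: ls => if l == "(map)" then scanAfterA ls else some l

def extract_line_after_py (lines : List String) (header : String) : String :=
  match PySem.List.index? lines header with
  | none => ""   -- Python raises CascadeError "Could not find section header …"
  | some i =>
    match scanAfterA (PySem.List.slice lines (some ((i : Int) + 1)) none) with
    | some l => l
    | none => ""   -- Python raises CascadeError "No content found after header …"

-- ===== PORT B =====
-- the while-loop of Source B, structurally recursive on a fuel that only bounds the iteration count
-- (hi - lo shrinks each step, so fuel = initial hi suffices; the fuel is a totality guard, not part of the algorithm)
def bsearchB (nonmap : List Int) (idx : Int) : Nat → Nat → Nat → Nat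
  | 0, lo, _ => lo
  | fuel + 1, lo, hi =>
    if lo < hi then
      let mid := (lo + hi) / 2
      if PySem.List.pyGetD nonmap (mid : Int) 0 ≤ idx then bsearchB nonmap idx fuel (mid + 1) hi
      else bsearchB nonmap idx fuel lo mid
    else lo

-- occ/nonmap are Source B's enumerate comprehensions; "" stands for the two CascadeError raises;
-- the final lines[nonmap[lo]] index is in range, pyGetD with default "" is exact there
def extract_line_after_py_alt (lines : List String) (header : String) : String :=
  let occ := ((PySem.List.enumerate lines).filter (fun q => q.2 == header)).map (·.1)
  match occ.head? with
  | none => ""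
  | some idx =>
    let nonmap := ((PySem.List.enumerate lines).filter (fun q => q.2 != "(map)")).map (·.1)
    let lo := bsearchB nonmap idx nonmap.length 0 nonmap.length
    if lo == nonmap.length then ""
    else PySem.List.pyGetD lines (PySem.List.pyGetD nonmap (lo : Int) 0) ""

-- ===== PRECONDITION & SPEC =====
-- Pre_ excludes exactly the inputs where Python A raises CascadeError: header absent, or every line after its first occurrence is "(map)"
def Pre_extract_line_after_py (lines : List String) (header : String) : Prop :=
  header ∈ lines ∧ (lines.drop (lines.idxOf header + 1)).any (fun l => l != "(map)") = true
instance (lines : List String) (header : String) : Decidable (Pre_extract_line_after_py lines header) := by unfold Pre_extract_line_after_py; infer_instance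

def pvWitness_extract_line_after_py : List String × String := (["h", "(map)", "x"], "h")

def Spec_extract_line_after_py (lines : List String) (header : String) (out : String) : Prop := out = extract_line_after_py_alt lines header
instance (lines : List String) (header : String) (out : String) : Decidable (Spec_extract_line_after_py lines header out) := by unfold Spec_extract_line_after_py; infer_instance

-- ===== CLAIM (what is proved, stated in full; the proofs are below) =====
def Claim_equal_extract_line_after_py : Prop := ∀ (lines : List String) (header : String), Dom_extract_line_after_py lines header → Pre_extract_line_after_py lines header → Spec_extract_line_after_py lines header (extract_line_after_py lines header)

-- ===== LEMMAS AND PROOFS =====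

-- clean Nat-level model of the two enumerate comprehensions: positions of elements satisfying p
def natIdxs (p : String → Bool) : List String → List Nat
  | [] => []
  | y :: ys => if p y then 0 :: (natIdxs p ys).map (· + 1) else (natIdxs p ys).map (· + 1)

theorem enum_filter_map (p : String → Bool) (xs : List String) : ∀ (s : Int),
    ((PySem.List.enumerate xs s).filter (fun q => p q.2)).map (·.1)
      = (natIdxs p xs).map (fun (k : Nat) => s + (k : Int)) := by
  induction xs with
  | nil => intro s; simp [natIdxs, PySem.List.enumerate_nil]
  | cons y ys ih =>
    intro s
    rw [PySem.List.enumerate_cons]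
    by_cases h : p y
    · simp only [natIdxs, h, if_true, List.filter_cons, List.map_cons, ih (s + 1), List.map_map]
      refine congrArg₂ _ (by ring) (List.map_congr_left fun k _ => ?_)
      simp only [Function.comp_apply]
      push_cast; ring
    · simp only [natIdxs, h, if_false, List.filter_cons, Bool.false_eq_true, ih (s + 1),
        List.map_map]
      exact List.map_congr_left fun k _ => by simp only [Function.comp_apply]; push_cast; ring

theorem occ_eq (lines : List String) (header : String) :
    ((PySem.List.enumerate lines 0).filter (fun q => q.2 == header)).map (·.1)
      = (natIdxs (fun l => l == header) lines).map (fun (k : Nat) => (k : Int)) := by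
  simpa using enum_filter_map (fun l => l == header) lines 0

theorem nonmap_eq (lines : List String) :
    ((PySem.List.enumerate lines 0).filter (fun q => q.2 != "(map)")).map (·.1)
      = (natIdxs (fun l => l != "(map)") lines).map (fun (k : Nat) => (k : Int)) := by
  simpa using enum_filter_map (fun l => l != "(map)") lines 0

theorem natIdxs_header_head? (header : String) (xs : List String) :
    (natIdxs (fun l => l == header) xs).head? = PySem.List.index? xs header := by
  induction xs with
  | nil => rfl
  | cons y ys ih =>
    by_cases h : y = header
    · subst h
      rw [PySem.List.index?_cons_self]
      simp [natIdxs]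
    · have hb : (y == header) = false := by simp [h]
      rw [PySem.List.index?_cons_of_ne _ h, ← ih]
      simp only [natIdxs, hb, Bool.false_eq_true, if_false, List.head?_map]

theorem natIdxs_lt_length (p : String → Bool) (xs : List String) :
    ∀ k ∈ natIdxs p xs, k < xs.length := by
  induction xs with
  | nil => simp [natIdxs]
  | cons y ys ih =>
    intro k hk
    simp only [List.length_cons]
    by_cases h : p y <;>
      simp only [natIdxs, h, if_true, if_false, Bool.false_eq_true, List.mem_cons,
        List.mem_map] at hk
    · rcases hk with h0 | ⟨j, hj, rfl⟩
      · omega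
      · have := ih j hj; omega
    · rcases hk with ⟨j, hj, rfl⟩; have := ih j hj; omega

theorem natIdxs_pairwise (p : String → Bool) (xs : List String) :
    (natIdxs p xs).Pairwise (· < ·) := by
  induction xs with
  | nil => exact List.Pairwise.nil
  | cons y ys ih =>
    have hm : ((natIdxs p ys).map (· + 1)).Pairwise (· < ·) :=
      List.Pairwise.map _ (fun a b h => by omega) ih
    by_cases h : p y
    · simp only [natIdxs, h, if_true]
      refine List.Pairwise.cons (fun b hb => ?_) hm
      simp only [List.mem_map] at hb
      rcases hb with ⟨j, _, rfl⟩
      omega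
    · simpa [natIdxs, h] using hm

theorem natIdxs_int_pairwise (p : String → Bool) (xs : List String) :
    (((natIdxs p xs).map (fun (k : Nat) => (k : Int))).Pairwise (· ≤ ·)) := by
  refine List.Pairwise.map _ (fun a b h => ?_) (natIdxs_pairwise p xs)
  exact_mod_cast Nat.le_of_lt h

theorem natIdxs_map_getD (p : String → Bool) (xs : List String) (d : String) :
    (natIdxs p xs).map (fun k => xs.getD k d) = xs.filter p := by
  induction xs with
  | nil => rfl
  | cons y ys ih =>
    by_cases h : p y <;>
      simp [natIdxs, h, List.map_map, Function.comp_def, List.getD,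
        List.getElem?_cons_succ, ← ih]

theorem natIdxs_countP (p : String → Bool) (xs : List String) (m : Nat) :
    (natIdxs p xs).countP (fun k => decide (k < m)) = ((xs.take m).filter p).length := by
  induction xs generalizing m with
  | nil => simp [natIdxs]
  | cons y ys ih =>
    cases m with
    | zero =>
      simp only [List.take_zero, List.filter_nil, List.length_nil]
      exact List.countP_eq_zero.mpr (by intro k _; simp)
    | succ m =>
      have hshift : ∀ (l : List Nat) (q : Nat → Bool), (∀ k, q (k + 1) = decide (k < m)) →
          (l.map (· + 1)).countP q = l.countP (fun k => decide (k < m)) := by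
        intro l q hq
        rw [List.countP_map]
        exact List.countP_congr (fun k _ => by simp only [Function.comp_apply, hq])
      by_cases h : p y
      · simp only [natIdxs, h, if_true, List.take_succ_cons, List.filter_cons,
          List.countP_cons, List.length_cons]
        rw [hshift _ _ (fun k => by rw [decide_eq_decide]; omega), ih m]
        simp
      · simp only [natIdxs, h, if_false, Bool.false_eq_true, List.take_succ_cons,
          List.filter_cons]
        rw [hshift _ _ (fun k => by rw [decide_eq_decide]; omega), ih m]

theorem natIdxs_length (p : String → Bool) (xs : List String) :
    (natIdxs p xs).length = (xs.filter p).length := by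
  have h := natIdxs_countP p xs xs.length
  rw [List.take_length] at h
  rw [← h]
  exact (List.countP_eq_length.mpr (fun k hk => by
    simpa using natIdxs_lt_length p xs k hk)).symm

-- monotone access into a (≤)-sorted list
theorem getD_mono_of_pairwise {xs : List Int} (hs : xs.Pairwise (· ≤ ·))
    {j j' : Nat} (hjj : j ≤ j') (hj' : j' < xs.length) (d : Int) :
    xs.getD j d ≤ xs.getD j' d := by
  rcases Nat.eq_or_lt_of_le hjj with rfl | hlt
  · exact le_refl _
  · have hj : j < xs.length := lt_trans hlt hj'
    rw [List.getD_eq_getElem xs d hj, List.getD_eq_getElem xs d hj']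
    exact (List.pairwise_iff_getElem.mp hs) j j' hj hj' hlt

theorem countP_eq_of_split (xs : List Int) (idx : Int) (lo : Nat) (hlo : lo ≤ xs.length)
    (h1 : ∀ j, j < lo → xs.getD j 0 ≤ idx)
    (h2 : ∀ j, lo ≤ j → j < xs.length → idx < xs.getD j 0) :
    xs.countP (fun v => decide (v ≤ idx)) = lo := by
  conv_lhs => rw [← List.take_append_drop lo xs]
  rw [List.countP_append]
  have hlen : (xs.take lo).length = lo := by simp; omega
  have hA : (xs.take lo).countP (fun v => decide (v ≤ idx)) = (xs.take lo).length := by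
    apply List.countP_eq_length.mpr
    intro a ha
    obtain ⟨j, hj, rfl⟩ := List.getElem_of_mem ha
    rw [List.getElem_take]
    have hj' : j < lo := by omega
    have := h1 j hj'
    rw [List.getD_eq_getElem xs 0 (by omega)] at this
    simpa using this
  have hB : (xs.drop lo).countP (fun v => decide (v ≤ idx)) = 0 := by
    apply List.countP_eq_zero.mpr
    intro a ha
    obtain ⟨j, hj, rfl⟩ := List.getElem_of_mem ha
    rw [List.getElem_drop]
    have hlt : lo + j < xs.length := by simp at hj; omega
    have := h2 (lo + j) (by omega) hlt
    rw [List.getD_eq_getElem xs 0 hlt] at this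
    simp; omega
  rw [hA, hB, hlen]
  omega

theorem bsearchB_eq (xs : List Int) (idx : Int) (hs : xs.Pairwise (· ≤ ·)) :
    ∀ (fuel lo hi : Nat), hi - lo ≤ fuel → lo ≤ hi → hi ≤ xs.length →
    (∀ j, j < lo → xs.getD j 0 ≤ idx) →
    (∀ j, hi ≤ j → j < xs.length → idx < xs.getD j 0) →
    bsearchB xs idx fuel lo hi = xs.countP (fun v => decide (v ≤ idx)) := by
  intro fuel
  induction fuel with
  | zero =>
    intro lo hi hn hle hhi h1 h2
    have heq : lo = hi := by omega
    subst heq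
    rw [bsearchB]
    exact (countP_eq_of_split xs idx lo (by omega) h1 h2).symm
  | succ n ih =>
    intro lo hi hn hle hhi h1 h2
    by_cases hlt : lo < hi
    · rw [bsearchB, if_pos hlt]
      simp only
      have hmlt : (lo + hi) / 2 < hi := by omega
      have hmlen : (lo + hi) / 2 < xs.length := by omega
      rw [PySem.List.pyGetD_natCast]
      by_cases hc : xs.getD ((lo + hi) / 2) 0 ≤ idx
      · rw [if_pos hc]
        exact ih ((lo + hi) / 2 + 1) hi (by omega) (by omega) hhi
          (fun j hj => le_trans (getD_mono_of_pairwise hs (by omega) hmlen 0) hc) h2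
      · rw [if_neg hc]
        exact ih lo ((lo + hi) / 2) (by omega) (by omega) (by omega) h1
          (fun j hj hjl => lt_of_lt_of_le (by omega)
            (getD_mono_of_pairwise hs hj hjl 0))
    · have heq : lo = hi := by omega
      subst heq
      rw [bsearchB, if_neg (by omega)]
      exact (countP_eq_of_split xs idx lo (by omega) h1 h2).symm

-- A's scan is head-of-filter
theorem scanAfterA_eq (ls : List String) :
    scanAfterA ls = (ls.filter (fun l => l != "(map)")).head? := by
  induction ls with
  | nil => rfl
  | cons l ls ih =>
    by_cases h : l == "(map)" <;> simp [scanAfterA, h, bne, ih]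

theorem natIdxs_int_countP (p : String → Bool) (xs : List String) (i : Nat) :
    ((natIdxs p xs).map (fun (k : Nat) => (k : Int))).countP (fun v => decide (v ≤ (i : Int)))
      = ((xs.take (i + 1)).filter p).length := by
  rw [List.countP_map, ← natIdxs_countP p xs (i + 1)]
  exact List.countP_congr (fun k _ => by
    simp only [Function.comp_apply, decide_eq_true_eq]
    omega)

theorem natIdxs_getD_lines (p : String → Bool) (xs : List String) (c : Nat)
    (hc : c < (natIdxs p xs).length) (d : String) :
    xs.getD ((natIdxs p xs).getD c 0) d = (xs.filter p).getD c d := by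
  have hmap := natIdxs_map_getD p xs d
  have hm : c < ((natIdxs p xs).map (fun k => xs.getD k d)).length := by simpa using hc
  have hf : c < (xs.filter p).length := by rw [← hmap]; simpa using hc
  calc xs.getD ((natIdxs p xs).getD c 0) d
      = ((natIdxs p xs).map (fun k => xs.getD k d))[c]'hm := by
        rw [List.getElem_map, List.getD_eq_getElem _ _ hc]
    _ = (xs.filter p)[c]'hf := List.getElem_of_eq hmap hm
    _ = (xs.filter p).getD c d := (List.getD_eq_getElem _ _ hf).symm

theorem alt_unfold (lines : List String) (header : String) :
    extract_line_after_py_alt lines header =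
      match ((natIdxs (fun l => l == header) lines).map (fun (k : Nat) => (k : Int))).head? with
      | none => ""
      | some idx =>
        if bsearchB ((natIdxs (fun l => l != "(map)") lines).map (fun (k : Nat) => (k : Int))) idx ((natIdxs (fun l => l != "(map)") lines).map (fun (k : Nat) => (k : Int))).length 0
            ((natIdxs (fun l => l != "(map)") lines).map (fun (k : Nat) => (k : Int))).length ==
            ((natIdxs (fun l => l != "(map)") lines).map (fun (k : Nat) => (k : Int))).length then ""
        else PySem.List.pyGetD lines
          (PySem.List.pyGetD ((natIdxs (fun l => l != "(map)") lines).map (fun (k : Nat) => (k : Int)))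
            ((bsearchB ((natIdxs (fun l => l != "(map)") lines).map (fun (k : Nat) => (k : Int))) idx ((natIdxs (fun l => l != "(map)") lines).map (fun (k : Nat) => (k : Int))).length 0
              ((natIdxs (fun l => l != "(map)") lines).map (fun (k : Nat) => (k : Int))).length : Nat) : Int) 0) "" := by
  unfold extract_line_after_py_alt
  rw [occ_eq lines header, nonmap_eq lines]

theorem ports_agree (lines : List String) (header : String) :
    extract_line_after_py lines header = extract_line_after_py_alt lines header := by
  rw [alt_unfold, List.head?_map, natIdxs_header_head?]
  unfold extract_line_after_py
  cases hidx : PySem.List.index? lines header with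
  | none => rfl
  | some i =>
    simp only [Option.map_some]
    have hpair := natIdxs_int_pairwise (fun l => l != "(map)") lines
    set p : String → Bool := fun l => l != "(map)" with hp
    set nm : List Int := (natIdxs p lines).map (fun (k : Nat) => (k : Int)) with hnm
    have hlo : bsearchB nm (i : Int) nm.length 0 nm.length
        = ((lines.take (i + 1)).filter p).length := by
      rw [bsearchB_eq nm (i : Int) hpair nm.length 0 nm.length (by omega) (by omega) (le_refl _)
        (fun j hj => absurd hj (by omega)) (fun j hj hjl => absurd hjl (by omega))]
      exact natIdxs_int_countP p lines i
    have hlen : nm.length = (lines.filter p).length := by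
      rw [hnm, List.length_map]; exact natIdxs_length p lines
    have hsplit : lines.filter p
        = (lines.take (i + 1)).filter p ++ (lines.drop (i + 1)).filter p := by
      conv_lhs => rw [← List.take_append_drop (i + 1) lines]
      rw [List.filter_append]
    have hslice : PySem.List.slice lines (some ((i : Int) + 1)) none = lines.drop (i + 1) := by
      have hcast : ((i : Int) + 1) = ((i + 1 : Nat) : Int) := by push_cast; ring
      rw [hcast, PySem.List.slice_from_natCast]
    rw [hslice, scanAfterA_eq, hlo]
    set c := ((lines.take (i + 1)).filter p).length with hc
    cases hrest : (lines.drop (i + 1)).filter p with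
    | nil =>
      have hce : c = nm.length := by
        rw [hlen, hsplit, hrest, List.append_nil]
      simp [hce]
    | cons x rest =>
      have hclt : c < nm.length := by
        rw [hlen, hsplit, hrest]; simp only [List.length_append, List.length_cons]; omega
      rw [if_neg (by simp only [beq_iff_eq]; omega)]
      have hclt' : c < (natIdxs p lines).length := by
        have hml : nm.length = (natIdxs p lines).length := by rw [hnm, List.length_map]
        omega
      have hgetnm : PySem.List.pyGetD nm (c : Int) 0 = (((natIdxs p lines).getD c 0 : Nat) : Int) := by
        rw [PySem.List.pyGetD_natCast, hnm]
        rw [List.getD_eq_getElem _ _ (by simpa using hclt'), List.getElem_map,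
          List.getD_eq_getElem _ _ hclt']
      rw [hgetnm, PySem.List.pyGetD_natCast]
      rw [natIdxs_getD_lines p lines c hclt' "", hsplit, hrest]
      rw [List.getD_eq_getElem _ _ (by simp only [List.length_append, List.length_cons]; omega)]
      rw [List.getElem_append_right (by omega)]
      have hz : c - (List.filter p (List.take (i + 1) lines)).length = 0 := by omega
      simp [hz]

-- ===== VERDICT (by name: the statement is the Claim_ definition above) =====
theorem extract_line_after_py_spec : Claim_equal_extract_line_after_py := by
  intro lines header _ _
  exact ports_agree lines header
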